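-- pv_equiv track=rewrite | github.com/copperdogma/cine-forge | src/cine_forge/ai/long_doc.py | split_screenplay_by_scene
-- ===== SOURCE A (Python) =====
-- def split_screenplay_by_scene(text: str) -> list[str]:
--     """Split screenplay-like text on scene heading boundaries."""
--     lines = text.splitlines()
--     if not lines:
--         return []
--
--     scenes: list[list[str]] = []
--     current: list[str] = []
--     for line in lines:
--         if _is_scene_heading(line) and current:
--             scenes.append(current)
--             current = [line]
--         else:
--             current.append(line)
--     if current:
--         scenes.append(current)
--     return ["\n".join(scene).strip() for scene in scenes if "\n".join(scene).strip()]
--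
-- def _is_scene_heading(line: str) -> bool:
--     stripped = line.strip().upper()
--     return stripped.startswith(("INT.", "EXT.", "INT/EXT.", "EST.", "I/E"))
-- ===== SOURCE B (Python) =====
-- def split_screenplay_by_scene(text: str) -> list[str]:
--     """Split screenplay-like text on scene heading boundaries."""
--     lines = text.splitlines()
--     chunks = _chunks(lines)
--     return ["\n".join(chunk).strip() for chunk in chunks if "\n".join(chunk).strip()]
--
--
-- def _chunks(lines: list[str]) -> list[list[str]]:
--     """Recursively peel off one scene: the first line plus all following
--     non-heading lines, then recurse on the rest."""
--     if not lines:
--         return []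
--     j = 1
--     while j < len(lines) and not _is_scene_heading(lines[j]):
--         j += 1
--     return [lines[:j]] + _chunks(lines[j:])
--
--
-- def _is_scene_heading(line: str) -> bool:
--     stripped = line.strip().upper()
--     return stripped.startswith(("INT.", "EXT.", "INT/EXT.", "EST.", "I/E"))
-- ===== Notes on version B (the rewrite author's own statement) =====
-- stated objective: alternative
-- what changed: Replaced A's single fold that threads a (scenes, current) accumulator pair through every line with a recursive chunker that repeatedly slices off one scene (first line plus the run of following non-heading lines) and recurses on the remainder.
import Mathlib
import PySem

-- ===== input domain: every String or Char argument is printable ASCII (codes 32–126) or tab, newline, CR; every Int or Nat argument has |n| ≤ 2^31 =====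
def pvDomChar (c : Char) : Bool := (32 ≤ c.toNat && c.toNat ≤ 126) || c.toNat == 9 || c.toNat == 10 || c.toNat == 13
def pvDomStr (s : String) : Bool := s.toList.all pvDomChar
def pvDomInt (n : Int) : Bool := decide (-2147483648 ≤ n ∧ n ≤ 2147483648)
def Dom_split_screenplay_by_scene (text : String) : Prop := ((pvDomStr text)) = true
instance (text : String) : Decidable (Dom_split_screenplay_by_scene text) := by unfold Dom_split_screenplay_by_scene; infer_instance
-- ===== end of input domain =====

-- B restructures A's accumulator fold as a recursive "peel one scene, recurse on the rest" chunker; same cost, alternative decomposition.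

-- shared helper: both Pythons define the identical _is_scene_heading
def pvIsSceneHeading (line : String) : Bool :=
  let stripped := PySem.Str.upper (PySem.Str.strip line)
  PySem.Str.startswith stripped "INT." || PySem.Str.startswith stripped "EXT." ||
  PySem.Str.startswith stripped "INT/EXT." || PySem.Str.startswith stripped "EST." ||
  PySem.Str.startswith stripped "I/E"

-- ===== PORT A =====
def pvAStep (st : List (List String) × List String) (line : String) :
    List (List String) × List String :=
  if pvIsSceneHeading line && !st.2.isEmpty then (st.1 ++ [st.2], [line])
  else (st.1, st.2 ++ [line])

def split_screenplay_by_scene (text : String) : List String :=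
  let lines := PySem.Str.splitlines text
  if lines = [] then []
  else
    let st := lines.foldl pvAStep ([], [])
    let scenes := if st.2.isEmpty then st.1 else st.1 ++ [st.2]
    (scenes.map (fun scene => PySem.Str.strip (PySem.Str.join "\n" scene))).filter (fun s => s ≠ "")

-- ===== PORT B =====
def pvChunks : List String → List (List String)
  | [] => []
  | l :: ls =>
    let pre := ls.takeWhile (fun x => !pvIsSceneHeading x)
    let rest := ls.dropWhile (fun x => !pvIsSceneHeading x)
    (l :: pre) :: pvChunks rest
termination_by ls => ls.length
decreasing_by
  simpa using Nat.lt_succ_of_le (List.length_dropWhile_le _ _)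

def split_screenplay_by_scene_alt (text : String) : List String :=
  let chunks := pvChunks (PySem.Str.splitlines text)
  (chunks.map (fun c => PySem.Str.strip (PySem.Str.join "\n" c))).filter (fun s => s ≠ "")

-- ===== PRECONDITION & SPEC =====
def Spec_split_screenplay_by_scene (text : String) (out : List String) : Prop := out = split_screenplay_by_scene_alt text
instance (text : String) (out : List String) : Decidable (Spec_split_screenplay_by_scene text out) := by unfold Spec_split_screenplay_by_scene; infer_instance

-- ===== CLAIM (what is proved, stated in full; the proofs are below) =====
def Claim_equal_split_screenplay_by_scene : Prop := ∀ (text : String), Dom_split_screenplay_by_scene text → Spec_split_screenplay_by_scene text (split_screenplay_by_scene text)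

-- ===== LEMMAS AND PROOFS =====

-- A's fold, finalized, produces exactly current-extended-by-the-nonheading-run followed by B's chunks.
theorem pvFold_eq_chunks (ls : List String) :
    ∀ (scenes : List (List String)) (cur : List String), cur ≠ [] →
    (let st := ls.foldl pvAStep (scenes, cur);
     if st.2.isEmpty then st.1 else st.1 ++ [st.2])
    = scenes ++ ((cur ++ ls.takeWhile (fun x => !pvIsSceneHeading x)) ::
        pvChunks (ls.dropWhile (fun x => !pvIsSceneHeading x))) := by
  induction ls with
  | nil =>
    intro scenes cur hcur
    simp [pvChunks, List.isEmpty_iff, hcur]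
  | cons l ls ih =>
    intro scenes cur hcur
    by_cases h : pvIsSceneHeading l = true
    · have step : pvAStep (scenes, cur) l = (scenes ++ [cur], [l]) := by
        simp [pvAStep, h, hcur]
      simp only [List.foldl_cons, step]
      rw [ih (scenes ++ [cur]) [l] (by simp)]
      simp [pvChunks, h]
    · have hb : pvIsSceneHeading l = false := by simpa using h
      have step : pvAStep (scenes, cur) l = (scenes, cur ++ [l]) := by
        simp [pvAStep, hb]
      simp only [List.foldl_cons, step]
      rw [ih scenes (cur ++ [l]) (by simp)]
      simp [hb]

-- ===== VERDICT (by name: the statement is the Claim_ definition above) =====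
theorem split_screenplay_by_scene_spec : Claim_equal_split_screenplay_by_scene := by
  intro text _
  unfold Spec_split_screenplay_by_scene split_screenplay_by_scene split_screenplay_by_scene_alt
  cases hls : PySem.Str.splitlines text with
  | nil => simp [pvChunks]
  | cons l ls =>
    simp only [hls]
    have step0 : pvAStep ([], []) l = ([], [l]) := by simp [pvAStep]
    have := pvFold_eq_chunks ls [] [l] (by simp)
    simp only [List.foldl_cons, step0] at *
    rw [if_neg (by simp)]
    rw [this]
    simp [pvChunks]
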